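-- pv_equiv track=rewrite | github.com/PollyGit/Python_Learning_mentor | Interviews/[172] Вконтакте.py | good_buttons2
-- ===== SOURCE A (Python) =====
-- def good_buttons2(t):
--     t2 = ''
--     for i in range(len(t)):
--         prev = t[i - 1] if i > 0 else None
--         curr = t[i]
--         next_ = t[i + 1] if i < len(t) - 1 else None
--         if curr != prev and curr != next_:
--             t2 += curr
--     return t2
-- ===== SOURCE B (Python) =====
-- def good_buttons2(t):
--     # run-length view: a character survives iff it forms a maximal run of length 1
--     out = []
--     i = 0
--     n = len(t)
--     while i < n:
--         j = i + 1
--         while j < n and t[j] == t[i]: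
--             j += 1
--         if j - i == 1:
--             out.append(t[i])
--         i = j
--     return ''.join(out)
-- ===== Notes on version B (the rewrite author's own statement) =====
-- stated objective: simpler
-- what changed: Replaces A's per-index loop with sentinel None neighbor comparisons by a run-length scan that keeps exactly the characters forming a maximal run of length 1.
import Mathlib
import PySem

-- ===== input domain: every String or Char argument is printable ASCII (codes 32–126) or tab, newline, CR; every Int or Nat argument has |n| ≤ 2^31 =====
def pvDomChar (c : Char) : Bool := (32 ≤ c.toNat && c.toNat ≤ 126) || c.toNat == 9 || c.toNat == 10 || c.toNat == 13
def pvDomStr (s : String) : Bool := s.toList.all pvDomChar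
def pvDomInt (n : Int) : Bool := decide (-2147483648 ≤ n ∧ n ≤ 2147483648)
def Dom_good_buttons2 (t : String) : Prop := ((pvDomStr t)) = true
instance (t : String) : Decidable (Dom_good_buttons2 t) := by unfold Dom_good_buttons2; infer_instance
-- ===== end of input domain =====

-- B replaces A's per-index neighbor test (with sentinel None neighbors) by a run-length scan
-- keeping exactly the maximal runs of length 1; objective: simpler (same O(n) cost).

-- ===== PORT A =====
-- loop body of A: neighbor comparison at index i (Python None → Option.none)
def aBody (l : List Char) (t2 : List Char) (i : Int) : List Char :=
  let prev : Option Char := if 0 < i then PySem.List.pyGet? l (i - 1) else none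
  let curr : Option Char := PySem.List.pyGet? l i
  let next_ : Option Char := if i < (l.length : Int) - 1 then PySem.List.pyGet? l (i + 1) else none
  if curr ≠ prev ∧ curr ≠ next_ then t2 ++ curr.toList else t2

def good_buttons2 (t : String) : String :=
  String.ofList ((PySem.List.pyRange 0 (t.toList.length : Int) 1).foldl (aBody t.toList) [])

-- ===== PORT B =====
-- the while loop of Source B: number of leading characters of the list equal to c (= k - 1)
def runLen (c : Char) : List Char → Nat
  | [] => 0
  | x :: xs => if x = c then runLen c xs + 1 else 0

-- the recursion of Source B over the list of characters
def altGo : List Char → List Char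
  | [] => []
  | c :: rest =>
      (if runLen c rest = 0 then [c] else []) ++ altGo (rest.drop (runLen c rest))
termination_by l => l.length
decreasing_by simp

def good_buttons2_alt (t : String) : String := String.ofList (altGo t.toList)

-- ===== PRECONDITION & SPEC =====
def Spec_good_buttons2 (t : String) (out : String) : Prop := out = good_buttons2_alt t
instance (t : String) (out : String) : Decidable (Spec_good_buttons2 t out) := by unfold Spec_good_buttons2; infer_instance

-- ===== CLAIM (what is proved, stated in full; the proofs are below) =====
def Claim_equal_good_buttons2 : Prop := ∀ (t : String), Dom_good_buttons2 t → Spec_good_buttons2 t (good_buttons2 t)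

-- ===== LEMMAS AND PROOFS =====

-- common reference recursion: emit c when it differs from the previous char and from the next
def specGo : Option Char → List Char → List Char
  | _, [] => []
  | prev, c :: rest =>
      (if some c ≠ prev ∧ rest.head? ≠ some c then [c] else []) ++ specGo (some c) rest

lemma runLen_zero_iff (c : Char) (l : List Char) : runLen c l = 0 ↔ l.head? ≠ some c := by
  cases l with
  | nil => simp [runLen]
  | cons x xs => by_cases h : x = c <;> simp [runLen, h]

lemma specGo_indiff (c : Char) (l : List Char) (h : l.head? ≠ some c) :
    specGo (some c) l = specGo none l := by
  cases l with
  | nil => rfl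
  | cons d xs =>
      simp only [List.head?_cons, ne_eq, Option.some.injEq] at h
      simp [specGo, h]

lemma specGo_skip (c : Char) (l : List Char) :
    specGo (some c) l = specGo none (l.drop (runLen c l)) := by
  induction l with
  | nil => rfl
  | cons x xs ih =>
      by_cases h : x = c
      · subst h
        show specGo (some x) (x :: xs) = specGo none ((x :: xs).drop (runLen x (x :: xs)))
        rw [show runLen x (x :: xs) = runLen x xs + 1 from by simp [runLen],
            List.drop_succ_cons, ← ih]
        simp [specGo]
      · have h0 : runLen c (x :: xs) = 0 := by simp [runLen, h]
        rw [h0, List.drop_zero, specGo_indiff]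
        simp [h]

lemma altGo_eq_spec_aux : ∀ (n : Nat) (l : List Char), l.length ≤ n → altGo l = specGo none l := by
  intro n
  induction n with
  | zero =>
      intro l hl
      have h0 : l = [] := List.length_eq_zero_iff.mp (by omega)
      rw [h0, altGo]
      rfl
  | succ n ih =>
      intro l hl
      match l with
      | [] => rw [altGo]; rfl
      | c :: rest =>
      rw [altGo, ih (rest.drop (runLen c rest)) (by simp at hl ⊢; omega), ← specGo_skip]
      by_cases h : rest.head? = some c
      · have : ¬ runLen c rest = 0 := by rw [runLen_zero_iff]; simp [h]
        simp [specGo, this, h]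
      · have : runLen c rest = 0 := by rw [runLen_zero_iff]; exact h
        simp [specGo, this, h]

lemma altGo_eq_spec (l : List Char) : altGo l = specGo none l :=
  altGo_eq_spec_aux l.length l le_rfl

lemma head?_drop' (l : List Char) (n : Nat) : (l.drop n).head? = l[n]? := by
  simp [List.head?_drop]

lemma aLoop (l : List Char) :
    ∀ (m j : Nat) (acc : List Char), l.length - j = m →
      (PySem.List.pyRange (j : Int) (l.length : Int) 1).foldl (aBody l) acc
        = acc ++ specGo (if j = 0 then none else l[j-1]?) (l.drop j) := by
  intro m
  induction m with
  | zero =>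
      intro j acc hm
      have hj : l.length ≤ j := by omega
      rw [PySem.List.pyRange_one_eq_nil (by exact_mod_cast hj),
          List.drop_eq_nil_of_le hj]
      simp [specGo]
  | succ m ih =>
      intro j acc hm
      have hj : j < l.length := by omega
      rw [PySem.List.pyRange_one_cons (by exact_mod_cast hj)]
      simp only [List.foldl_cons]
      have hcast : (j : Int) + 1 = ((j + 1 : Nat) : Int) := by push_cast; ring
      rw [hcast, ih (j + 1) _ (by omega)]
      -- compute the loop body at index j
      have hdrop : l.drop j = l[j] :: l.drop (j + 1) := List.drop_eq_getElem_cons hj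
      have hcurr : PySem.List.pyGet? l (j : Int) = some l[j] := by
        simp [PySem.List.pyGet?_natCast, List.getElem?_eq_getElem hj]
      have hprev : (if 0 < (j : Int) then PySem.List.pyGet? l ((j : Int) - 1) else none)
          = (if j = 0 then none else l[j-1]?) := by
        by_cases h0 : j = 0
        · simp [h0]
        · have hc1 : (j : Int) - 1 = ((j - 1 : Nat) : Int) := by omega
          have hj0 : (0 : Int) < (j : Int) := by omega
          rw [if_pos hj0, if_neg h0, hc1, PySem.List.pyGet?_natCast]
      have hnext : (if (j : Int) < (l.length : Int) - 1 then PySem.List.pyGet? l ((j : Int) + 1) else none)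
          = l[j+1]? := by
        by_cases h1 : j + 1 < l.length
        · have hlt : (j : Int) < (l.length : Int) - 1 := by omega
          rw [if_pos hlt, hcast, PySem.List.pyGet?_natCast]
        · rw [if_neg (by omega), List.getElem?_eq_none (by omega)]
      rw [hdrop]
      simp only [aBody, hcurr, hprev, hnext, specGo, head?_drop']
      have hcond : (some l[j] ≠ (if j = 0 then none else l[j-1]?) ∧ some l[j] ≠ l[j+1]?)
          ↔ (some l[j] ≠ (if j = 0 then none else l[j-1]?) ∧ l[j+1]? ≠ some l[j]) := by
        constructor <;> exact fun ⟨a, b⟩ => ⟨a, b.symm⟩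
      have hj1 : j + 1 - 1 = j := by omega
      by_cases hc : some l[j] ≠ (if j = 0 then none else l[j-1]?) ∧ some l[j] ≠ l[j+1]?
      · rw [if_pos hc, if_pos (hcond.mp hc)]
        simp [hj1, List.getElem?_eq_getElem hj, List.append_assoc]
      · rw [if_neg hc, if_neg (fun h => hc (hcond.mpr h))]
        simp [hj1, List.getElem?_eq_getElem hj]

lemma aCore_eq_spec (l : List Char) :
    (PySem.List.pyRange 0 (l.length : Int) 1).foldl (aBody l) [] = specGo none l := by
  have := aLoop l l.length 0 [] (by omega)
  simpa using this

-- ===== VERDICT (by name: the statement is the Claim_ definition above) =====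
theorem good_buttons2_spec : Claim_equal_good_buttons2 := by
  intro t _
  unfold Spec_good_buttons2 good_buttons2 good_buttons2_alt
  rw [aCore_eq_spec, altGo_eq_spec]
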